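-- pv_equiv track=rewrite | github.com/syyynth/advent-of-code | aoc2024/day9/main.py | get_distances_and_positions
-- ===== SOURCE A (Python) =====
-- import heapq
-- from collections import defaultdict
--
-- def get_distances_and_positions(unpacked):
--     distances = defaultdict(list)
--     positions = defaultdict(list)
--
--     start = True
--     pos = 0
--     for idx, n in enumerate(unpacked):
--         if n != -1:
--             if not start:
--                 heapq.heappush(distances[idx - pos], pos)
--                 start = True
--             positions[n].append(idx)
--         elif n == -1 and start:
--             pos = idx
--             start = False
--     return distances, positions
-- ===== SOURCE B (Python) =====
-- from collections import defaultdict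
--
-- def get_distances_and_positions(unpacked):
--     # phase 1: split the disk map into maximal runs of free (-1) / file cells
--     n = len(unpacked)
--     runs = []
--     i = 0
--     while i < n:
--         free = unpacked[i] == -1
--         j = i
--         while j < n and (unpacked[j] == -1) == free:
--             j += 1
--         runs.append((free, i, j))
--         i = j
--     # phase 2: a free run that is not the last run is a finished gap;
--     # gap starts arrive left-to-right (increasing), so appending keeps the
--     # list a valid heap identical to A's heappush layout
--     distances = defaultdict(list)
--     positions = defaultdict(list)
--     for k, (free, s, e) in enumerate(runs):
--         if free:
--             if k < len(runs) - 1: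
--                 distances[e - s].append(s)
--         else:
--             for idx in range(s, e):
--                 positions[unpacked[idx]].append(idx)
--     return distances, positions
-- ===== Notes on version B (the rewrite author's own statement) =====
-- stated objective: alternative
-- what changed: Replaced A's one-pass start/pos state machine (with heapq pushes) by a two-phase run decomposition: first split the input into maximal free/file runs with an index scan, then emit each non-final free run's start into distances[length] and each file run's indices into positions; since gap starts arrive in increasing order a plain append reproduces A's heap layout.
import Mathlib
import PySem

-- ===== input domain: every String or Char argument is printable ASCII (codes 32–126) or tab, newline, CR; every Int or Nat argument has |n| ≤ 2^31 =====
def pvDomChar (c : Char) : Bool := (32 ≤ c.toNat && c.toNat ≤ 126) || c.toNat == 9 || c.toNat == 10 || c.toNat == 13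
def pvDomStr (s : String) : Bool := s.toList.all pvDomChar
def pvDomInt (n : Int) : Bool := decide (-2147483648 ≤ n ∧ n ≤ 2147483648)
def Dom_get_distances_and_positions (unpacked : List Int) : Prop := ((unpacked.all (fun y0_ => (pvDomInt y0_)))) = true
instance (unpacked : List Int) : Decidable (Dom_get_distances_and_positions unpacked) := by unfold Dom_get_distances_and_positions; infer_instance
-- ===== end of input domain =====

-- B replaces A's one-pass start/pos state machine by a two-phase run decomposition
-- (split into maximal runs, then process runs); same O(n) cost, return value proved equal.

-- ===== PORT A =====
-- heapq._siftdown(heap, 0, pos) transliterated; fuel bounds the strictly decreasing pos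
def pvSiftdownLoop : Nat → List Int → Nat → Int → List Int
  | 0, heap, pos, newitem => heap.set pos newitem
  | fuel+1, heap, pos, newitem =>
    if 0 < pos then
      let parentpos := (pos - 1) / 2
      let parent := heap.getD parentpos 0
      if newitem < parent then
        pvSiftdownLoop fuel (heap.set pos parent) parentpos newitem
      else heap.set pos newitem
    else heap.set pos newitem

-- heapq.heappush: heap.append(item); _siftdown(heap, 0, len(heap)-1)
def pvHeappush (heap : List Int) (x : Int) : List Int :=
  pvSiftdownLoop heap.length (heap ++ [x]) heap.length x

def pvStepA (acc : PySem.Dict Int (List Int) × PySem.Dict Int (List Int) × Bool × Int)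
    (iv : Int × Int) : PySem.Dict Int (List Int) × PySem.Dict Int (List Int) × Bool × Int :=
  match acc, iv with
  | (distances, positions, start, pos), (idx, n) =>
    if n ≠ -1 then
      let distances' := if start = false then
          distances.insert (idx - pos) (pvHeappush (distances.getD (idx - pos) []) pos)
        else distances
      (distances', positions.insert n (positions.getD n [] ++ [idx]), true, pos)
    else if start = true then
      (distances, positions, false, idx)
    else
      (distances, positions, start, pos)

def get_distances_and_positions (unpacked : List Int) :
    (List (Int × List Int)) × (List (Int × List Int)) :=
  let st := (PySem.List.enumerate unpacked 0).foldl pvStepA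
    (PySem.Dict.empty, PySem.Dict.empty, true, 0)
  (st.1.items, st.2.1.items)

-- ===== PORT B =====
-- inner while: while j < n and (unpacked[j] == -1) == free: j += 1   (fuel = n - j)
def pvScanRun (u : List Int) (free : Bool) : Nat → Nat → Nat
  | j, 0 => j
  | j, fuel+1 =>
    if j < u.length ∧ decide (u.getD j 0 = -1) = free then pvScanRun u free (j+1) fuel else j

-- outer while over i, collecting (free, i, j) runs; each run advances i, so fuel = n suffices
def pvRunsLoop (u : List Int) : Nat → Nat → List (Bool × Nat × Nat)
  | _, 0 => []
  | i, fuel+1 =>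
    if i < u.length then
      let free := decide (u.getD i 0 = -1)
      let j := pvScanRun u free i (u.length - i)
      (free, i, j) :: pvRunsLoop u j fuel
    else []

def pvStepB (total : Int) (u : List Int)
    (acc : PySem.Dict Int (List Int) × PySem.Dict Int (List Int))
    (kr : Int × (Bool × Nat × Nat)) :
    PySem.Dict Int (List Int) × PySem.Dict Int (List Int) :=
  match acc, kr with
  | (distances, positions), (k, (free, s, e)) =>
    if free then
      if k < total - 1 then
        (distances.insert ((e : Int) - (s : Int))
          (distances.getD ((e : Int) - (s : Int)) [] ++ [(s : Int)]), positions)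
      else (distances, positions)
    else
      (distances,
        (PySem.List.pyRange (s : Int) (e : Int) 1).foldl
          (fun p idx =>
            p.insert (PySem.List.pyGetD u idx 0)
              (p.getD (PySem.List.pyGetD u idx 0) [] ++ [idx])) positions)

def get_distances_and_positions_alt (unpacked : List Int) :
    (List (Int × List Int)) × (List (Int × List Int)) :=
  let runs := pvRunsLoop unpacked 0 unpacked.length
  let res := (PySem.List.enumerate runs 0).foldl
    (pvStepB (PySem.List.len runs) unpacked) (PySem.Dict.empty, PySem.Dict.empty)
  (res.1.items, res.2.items)

-- ===== PRECONDITION & SPEC =====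
def Spec_get_distances_and_positions (unpacked : List Int) (out : (List (Int × List Int)) × (List (Int × List Int))) : Prop := out = get_distances_and_positions_alt unpacked
instance (unpacked : List Int) (out : (List (Int × List Int)) × (List (Int × List Int))) : Decidable (Spec_get_distances_and_positions unpacked out) := by unfold Spec_get_distances_and_positions; infer_instance

-- ===== CLAIM (what is proved, stated in full; the proofs are below) =====
def Claim_equal_get_distances_and_positions : Prop := ∀ (unpacked : List Int), Dom_get_distances_and_positions unpacked → Spec_get_distances_and_positions unpacked (get_distances_and_positions unpacked)

-- ===== LEMMAS AND PROOFS =====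

-- abbreviating the positions-update step of both programs
def pvPStep (p : PySem.Dict Int (List Int)) (iv : Int × Int) : PySem.Dict Int (List Int) :=
  p.insert iv.2 (p.getD iv.2 [] ++ [iv.1])

def pvAppendPos (p : PySem.Dict Int (List Int)) (seg : List Int) (s : Int) :
    PySem.Dict Int (List Int) :=
  (PySem.List.enumerate seg s).foldl pvPStep p

-- B's inner positions loop, named for the proofs
def pvInner (u : List Int) (s e : Nat) (p : PySem.Dict Int (List Int)) :
    PySem.Dict Int (List Int) :=
  (PySem.List.pyRange (s : Int) (e : Int) 1).foldl
    (fun p idx =>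
      p.insert (PySem.List.pyGetD u idx 0)
        (p.getD (PySem.List.pyGetD u idx 0) [] ++ [idx])) p

-- recursive form of B's second phase: a free run is counted iff it is not last
def pvProcRuns (u : List Int) :
    List (Bool × Nat × Nat) →
    PySem.Dict Int (List Int) × PySem.Dict Int (List Int) →
    PySem.Dict Int (List Int) × PySem.Dict Int (List Int)
  | [], acc => acc
  | (free, s, e) :: rest, (d, p) =>
    if free then
      if rest = [] then (d, p)
      else pvProcRuns u rest
        (d.insert ((e : Int) - (s : Int)) (d.getD ((e : Int) - (s : Int)) [] ++ [(s : Int)]), p)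
    else pvProcRuns u rest (d, pvInner u s e p)

-- invariant: all stored gap starts are < i, so a heappush of i is a plain append
def pvInv (d : PySem.Dict Int (List Int)) (i : Nat) : Prop :=
  d.keys.Nodup ∧ ∀ kv ∈ d.items, ∀ y ∈ kv.2, y < (i : Int)

theorem pvHeappush_append (h : List Int) (x : Int) (hx : ∀ y ∈ h, y ≤ x) :
    pvHeappush h x = h ++ [x] := by
  cases h with
  | nil => simp [pvHeappush, pvSiftdownLoop]
  | cons a t =>
    have hplt : t.length / 2 < (a :: t).length := by simp; omega
    have hpar : ((a :: t) ++ [x]).getD (t.length / 2) 0 = (a :: t)[t.length / 2] := by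
      rw [List.getD_eq_getElem?_getD, List.getElem?_append_left hplt,
        List.getElem?_eq_getElem hplt]
      rfl
    have hle : (a :: t)[t.length / 2] ≤ x := hx _ (List.getElem_mem _)
    simp only [pvHeappush, List.length_cons, pvSiftdownLoop, Nat.add_sub_cancel]
    rw [if_pos (Nat.succ_pos _), hpar, if_neg (by omega)]
    rw [List.set_append, if_neg (by simp)]
    simp

theorem pvScanRun_spec (u : List Int) (free : Bool) (fuel : Nat) :
    ∀ j, j ≤ u.length → u.length ≤ j + fuel →
      j ≤ pvScanRun u free j fuel ∧ pvScanRun u free j fuel ≤ u.length ∧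
      (∀ k, j ≤ k → k < pvScanRun u free j fuel → decide (u.getD k 0 = -1) = free) ∧
      (pvScanRun u free j fuel = u.length ∨
        decide (u.getD (pvScanRun u free j fuel) 0 = -1) ≠ free) := by
  induction fuel with
  | zero =>
    intro j h1 h2
    have hj : j = u.length := by omega
    simp only [pvScanRun]
    exact ⟨le_refl _, by omega, fun k hk1 hk2 => by omega, Or.inl hj⟩
  | succ f ih =>
    intro j h1 h2
    by_cases hc : j < u.length ∧ decide (u.getD j 0 = -1) = free
    · rw [show pvScanRun u free j (f+1) = pvScanRun u free (j+1) f from by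
        simp only [pvScanRun, if_pos hc]]
      obtain ⟨ih1, ih2, ih3, ih4⟩ := ih (j+1) (by omega) (by omega)
      refine ⟨by omega, ih2, ?_, ih4⟩
      intro k hk1 hk2
      rcases Nat.eq_or_lt_of_le hk1 with h | h
      · rw [← h]; exact hc.2
      · exact ih3 k (by omega) hk2
    · rw [show pvScanRun u free j (f+1) = j from by simp only [pvScanRun, if_neg hc]]
      refine ⟨le_refl _, h1, fun k hk1 hk2 => by omega, ?_⟩
      by_cases hl : j < u.length
      · right; intro hb; exact hc ⟨hl, hb⟩
      · left; omega

-- elements of the slice u[a:b] are u.getD k 0 for a ≤ k < b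
theorem pvMemSeg (u : List Int) (a b : Nat) (hb : b ≤ u.length) :
    ∀ x ∈ (u.drop a).take (b - a), ∃ k : Nat, a ≤ k ∧ k < b ∧ x = u.getD k 0 := by
  intro x hx
  obtain ⟨t, ht, hxe⟩ := List.mem_iff_getElem.1 hx
  have ht' := ht
  simp [List.length_take, List.length_drop] at ht'
  have htl : t < (u.drop a).length := by simp [List.length_drop]; omega
  have : ((u.drop a).take (b - a))[t] = u[a + t]'(by simp [List.length_drop] at htl ⊢; omega) := by
    rw [List.getElem_take, List.getElem_drop]
  refine ⟨a + t, by omega, by omega, ?_⟩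
  rw [← hxe, this, List.getD_eq_getElem]

theorem pvFoldA_free_false (seg : List Int) (hseg : ∀ x ∈ seg, x = -1) :
    ∀ (s q : Int) (d p : PySem.Dict Int (List Int)),
      (PySem.List.enumerate seg s).foldl pvStepA (d, p, false, q) = (d, p, false, q) := by
  induction seg with
  | nil => intro s q d p; simp [PySem.List.enumerate_nil]
  | cons x t ih =>
    intro s q d p
    rw [PySem.List.enumerate_cons, List.foldl_cons]
    have hx : x = -1 := hseg x (by simp)
    rw [show pvStepA (d, p, false, q) (s, x) = (d, p, false, q) from by simp [pvStepA, hx]]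
    exact ih (fun y hy => hseg y (by simp [hy])) (s+1) q d p

theorem pvFoldA_free (seg : List Int) (hne : seg ≠ []) (hseg : ∀ x ∈ seg, x = -1) :
    ∀ (s pos : Int) (d p : PySem.Dict Int (List Int)),
      (PySem.List.enumerate seg s).foldl pvStepA (d, p, true, pos) = (d, p, false, s) := by
  cases seg with
  | nil => exact absurd rfl hne
  | cons x t =>
    intro s pos d p
    rw [PySem.List.enumerate_cons, List.foldl_cons]
    have hx : x = -1 := hseg x (by simp)
    rw [show pvStepA (d, p, true, pos) (s, x) = (d, p, false, s) from by simp [pvStepA, hx]]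
    exact pvFoldA_free_false t (fun y hy => hseg y (by simp [hy])) (s+1) s d p

theorem pvFoldA_file (seg : List Int) (hseg : ∀ x ∈ seg, x ≠ -1) :
    ∀ (s pos : Int) (d p : PySem.Dict Int (List Int)),
      (PySem.List.enumerate seg s).foldl pvStepA (d, p, true, pos)
        = (d, pvAppendPos p seg s, true, pos) := by
  induction seg with
  | nil => intro s pos d p; simp [PySem.List.enumerate_nil, pvAppendPos]
  | cons x t ih =>
    intro s pos d p
    rw [PySem.List.enumerate_cons, List.foldl_cons]
    have hx : x ≠ -1 := hseg x (by simp)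
    rw [show pvStepA (d, p, true, pos) (s, x) = (d, pvPStep p (s, x), true, pos) from by
      simp [pvStepA, hx, pvPStep]]
    rw [ih (fun y hy => hseg y (by simp [hy])) (s+1) pos d (pvPStep p (s, x))]
    simp [pvAppendPos, PySem.List.enumerate_cons]

theorem pvInner_eq_aux (u : List Int) :
    ∀ (m s : Nat) (p : PySem.Dict Int (List Int)), s + m ≤ u.length →
      pvInner u s (s + m) p = pvAppendPos p ((u.drop s).take m) (s : Int) := by
  intro m
  induction m with
  | zero =>
    intro s p h
    simp [pvInner, pvAppendPos, PySem.List.pyRange_one_eq_nil (le_refl _), PySem.List.enumerate_nil]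
  | succ m ih =>
    intro s p h
    have hs : s < u.length := by omega
    have hcast : ((s + (m+1) : Nat) : Int) = (s : Int) + (m + 1) := by push_cast; ring
    have hlt : (s : Int) < (s : Int) + (m + 1) := by omega
    rw [pvInner, hcast, PySem.List.pyRange_one_cons hlt, List.foldl_cons]
    have hget : PySem.List.pyGetD u ((s : Int)) 0 = u[s] := by
      rw [PySem.List.pyGetD_natCast, List.getD_eq_getElem]
    have hdrop : (u.drop s).take (m + 1) = u[s] :: (u.drop (s+1)).take m := by
      rw [List.drop_eq_getElem_cons hs, List.take_succ_cons]
    rw [hdrop, pvAppendPos, PySem.List.enumerate_cons, List.foldl_cons]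
    have hstep : pvPStep p ((s : Int), u[s])
        = p.insert (PySem.List.pyGetD u ((s : Int)) 0)
            (p.getD (PySem.List.pyGetD u ((s : Int)) 0) [] ++ [(s : Int)]) := by
      rw [hget]; rfl
    rw [← hstep]
    have := ih (s+1) (pvPStep p ((s : Int), u[s])) (by omega)
    rw [pvInner] at this
    have hc2 : (((s+1) + m : Nat) : Int) = (s : Int) + (m + 1) := by push_cast; ring
    have hc3 : ((s : Int) + 1) = (((s+1) : Nat) : Int) := by push_cast; ring
    rw [hc2] at this
    rw [hc3, this, pvAppendPos]

theorem pvInner_eq (u : List Int) (s e : Nat) (p : PySem.Dict Int (List Int))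
    (h1 : s ≤ e) (h2 : e ≤ u.length) :
    pvInner u s e p = pvAppendPos p ((u.drop s).take (e - s)) (s : Int) := by
  have := pvInner_eq_aux u (e - s) s p (by omega)
  rwa [Nat.add_sub_cancel' h1] at this

theorem pvFoldB_eq_procRuns (u : List Int) :
    ∀ (rs : List (Bool × Nat × Nat)) (k : Nat) (acc : _ × _),
      (PySem.List.enumerate rs (k : Int)).foldl (pvStepB ((k + rs.length : Nat) : Int) u) acc
        = pvProcRuns u rs acc := by
  intro rs
  induction rs with
  | nil => intro k acc; simp [pvProcRuns, PySem.List.enumerate_nil]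
  | cons r rest ih =>
    intro k acc
    obtain ⟨free, s, e⟩ := r
    obtain ⟨d, p⟩ := acc
    rw [PySem.List.enumerate_cons, List.foldl_cons]
    simp only [List.length_cons]
    have hkk : ((k : Int) + 1) = (((k+1) : Nat) : Int) := by push_cast; ring
    have htot : ((k + (rest.length + 1) : Nat) : Int) = (((k+1) + rest.length : Nat) : Int) := by
      push_cast; ring
    cases free with
    | true =>
      by_cases hr : rest = []
      · have hcond : ¬ ((k : Int) < ((k + (rest.length + 1) : Nat) : Int) - 1) := by
          rw [hr]; push_cast; simp
        rw [show pvStepB ((k + (rest.length + 1) : Nat) : Int) u (d, p) ((k : Int), (true, s, e))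
            = (d, p) from by simp only [pvStepB]; rw [if_neg hcond]; simp]
        rw [hr]
        simp [pvProcRuns, PySem.List.enumerate_nil]
      · have h0 : 0 < rest.length := List.length_pos_of_ne_nil hr
        have hcond : (k : Int) < ((k + (rest.length + 1) : Nat) : Int) - 1 := by
          push_cast; omega
        rw [show pvStepB ((k + (rest.length + 1) : Nat) : Int) u (d, p) ((k : Int), (true, s, e))
            = (d.insert ((e : Int) - (s : Int)) (d.getD ((e : Int) - (s : Int)) [] ++ [(s : Int)]), p) from by
          simp only [pvStepB]; rw [if_pos hcond]; simp]
        rw [hkk, htot, ih (k+1) _]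
        simp [pvProcRuns, hr]
    | false =>
      rw [show pvStepB ((k + (rest.length + 1) : Nat) : Int) u (d, p) ((k : Int), (false, s, e))
          = (d, pvInner u s e p) from by simp [pvStepB, pvInner]]
      rw [hkk, htot, ih (k+1) _]
      simp [pvProcRuns]

theorem pvInv_mono {d : PySem.Dict Int (List Int)} {i i' : Nat}
    (h : pvInv d i) (hle : i ≤ i') : pvInv d i' := by
  refine ⟨h.1, fun kv hkv y hy => lt_of_lt_of_le (h.2 kv hkv y hy) (by exact_mod_cast hle)⟩

theorem pvInv_getD {d : PySem.Dict Int (List Int)} {i : Nat} (h : pvInv d i) (k : Int) :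
    ∀ y ∈ d.getD k [], y < (i : Int) := by
  intro y hy
  cases hg : d.get? k with
  | none => rw [PySem.Dict.getD_of_get?_eq_none d [] hg] at hy; exact absurd hy (by simp)
  | some v =>
    rw [PySem.Dict.getD_eq_get?_getD, hg] at hy
    exact h.2 (k, v) (PySem.Dict.mem_items_of_get?_eq_some d hg) y hy

theorem pvInv_insert {d : PySem.Dict Int (List Int)} {i j : Nat} {k : Int}
    (h : pvInv d i) (hij : i < j) :
    pvInv (d.insert k (d.getD k [] ++ [(i : Int)])) j := by
  refine ⟨PySem.Dict.nodup_keys_insert d k _ h.1, ?_⟩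
  intro kv hkv y hy
  rcases (PySem.Dict.mem_items_insert d k _ kv).1 hkv with hkv | ⟨hm, _⟩
  · rw [hkv] at hy
    rcases List.mem_append.1 hy with hy | hy
    · exact lt_trans (pvInv_getD h k y hy) (by exact_mod_cast hij)
    · simp at hy; rw [hy]; exact_mod_cast hij
  · exact lt_trans (h.2 kv hm y hy) (by exact_mod_cast hij)

theorem pvRunsLoop_nil (u : List Int) (i : Nat) (hi : ¬ i < u.length) :
    ∀ fuel, pvRunsLoop u i fuel = [] := by
  intro fuel; cases fuel <;> simp [pvRunsLoop, hi]

theorem pvMain (u : List Int) :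
    ∀ (fuel i : Nat) (d p : PySem.Dict Int (List Int)) (pos : Int),
      u.length ≤ i + fuel → i ≤ u.length → pvInv d i →
      (((PySem.List.enumerate (u.drop i) (i : Int)).foldl pvStepA (d, p, true, pos)).1,
        ((PySem.List.enumerate (u.drop i) (i : Int)).foldl pvStepA (d, p, true, pos)).2.1)
        = pvProcRuns u (pvRunsLoop u i fuel) (d, p) := by
  intro fuel
  induction fuel using Nat.strong_induction_on with
  | _ fuel ihf =>
  intro i d p pos hfuel hi hinv
  by_cases hlt : i < u.length
  case neg =>
    have hdrop : u.drop i = [] := List.drop_eq_nil_of_le (by omega)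
    rw [hdrop, PySem.List.enumerate_nil, List.foldl_nil, pvRunsLoop_nil u i hlt]
    rfl
  case pos =>
  cases fuel with
  | zero => exact absurd hfuel (by omega)
  | succ f =>
  set free := decide (u.getD i 0 = -1) with hfree
  set j := pvScanRun u free i (u.length - i) with hj
  have hrl : pvRunsLoop u i (f+1) = (free, i, j) :: pvRunsLoop u j f := by
    simp only [pvRunsLoop, if_pos hlt]
    rw [← hfree, ← hj]
  obtain ⟨hij, hjlen, hall, hend⟩ := pvScanRun_spec u free (u.length - i) i hi (by omega)
  rw [← hj] at hij hjlen hall hend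
  have hij' : i < j := by
    rcases Nat.eq_or_lt_of_le hij with h | h
    · rcases hend with h2 | h2
      · omega
      · rw [← h] at h2; exact absurd hfree.symm h2
    · exact h
  set seg := (u.drop i).take (j - i) with hsegdef
  have hseglen : seg.length = j - i := by
    simp [hsegdef, List.length_take, List.length_drop]; omega
  have hsplit : u.drop i = seg ++ u.drop j := by
    rw [hsegdef]
    conv_lhs => rw [← List.take_append_drop (j - i) (u.drop i)]
    rw [List.drop_drop, show i + (j - i) = j from by omega]
  have hcastj : (i : Int) + (seg.length : Int) = (j : Int) := by
    rw [hseglen]; push_cast [Nat.cast_sub hij]; ring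
  rw [hsplit, PySem.List.enumerate_append, List.foldl_append, hcastj, hrl]
  cases hfb : free with
  | false =>
    have hsegne : ∀ x ∈ seg, x ≠ -1 := by
      intro x hx
      obtain ⟨k, hk1, hk2, hk3⟩ := pvMemSeg u i j hjlen x hx
      have := hall k hk1 hk2
      rw [hfb] at this; simp at this; rw [hk3]; exact this
    rw [pvFoldA_file seg hsegne (i : Int) pos d p]
    have hIH := ihf f (by omega) j d (pvAppendPos p seg (i : Int)) pos (by omega) hjlen
      (pvInv_mono hinv hij)
    rw [hIH]
    show _ = pvProcRuns u ((false, i, j) :: pvRunsLoop u j f) (d, p)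
    rw [pvProcRuns, pvInner_eq u i j p hij hjlen, ← hsegdef]
    simp
  | true =>
    have hsegeq : ∀ x ∈ seg, x = -1 := by
      intro x hx
      obtain ⟨k, hk1, hk2, hk3⟩ := pvMemSeg u i j hjlen x hx
      have := hall k hk1 hk2
      rw [hfb] at this; simp at this; rw [hk3]; exact this
    have hsegne : seg ≠ [] := by
      intro hnil; rw [hnil] at hseglen; simp at hseglen; omega
    rw [pvFoldA_free seg hsegne hsegeq (i : Int) pos d p]
    by_cases hjl : j < u.length
    case neg =>
      have hdropj : u.drop j = [] := List.drop_eq_nil_of_le (by omega)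
      rw [hdropj, PySem.List.enumerate_nil, List.foldl_nil,
        pvRunsLoop_nil u j hjl f]
      rfl
    case pos =>
      have hj2ne : ¬ (u.getD j 0 = -1) := by
        rcases hend with h2 | h2
        · omega
        · rw [hfb] at h2; simpa using h2
      cases f with
      | zero => exact absurd hfuel (by omega)
      | succ f2 =>
      set free2 := decide (u.getD j 0 = -1) with hfree2
      have hfree2f : free2 = false := by rw [hfree2, decide_eq_false_iff_not]; exact hj2ne
      set j2 := pvScanRun u free2 j (u.length - j) with hj2
      have hrl2 : pvRunsLoop u j (f2+1) = (free2, j, j2) :: pvRunsLoop u j2 f2 := by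
        simp only [pvRunsLoop, if_pos hjl]
        rw [← hfree2, ← hj2]
      obtain ⟨hjj2, hj2len, hall2, hend2⟩ := pvScanRun_spec u free2 (u.length - j) j (by omega) (by omega)
      rw [← hj2] at hjj2 hj2len hall2 hend2
      have hjj2' : j < j2 := by
        rcases Nat.eq_or_lt_of_le hjj2 with h | h
        · rcases hend2 with h2 | h2
          · omega
          · rw [← h] at h2; exact absurd hfree2.symm h2
        · exact h
      set seg2 := (u.drop j).take (j2 - j) with hseg2def
      have hseg2len : seg2.length = j2 - j := by
        simp [hseg2def, List.length_take, List.length_drop]; omega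
      have hsplit2 : u.drop j = seg2 ++ u.drop j2 := by
        rw [hseg2def]
        conv_lhs => rw [← List.take_append_drop (j2 - j) (u.drop j)]
        rw [List.drop_drop, show j + (j2 - j) = j2 from by omega]
      have hcastj2 : (j : Int) + (seg2.length : Int) = (j2 : Int) := by
        rw [hseg2len]; push_cast [Nat.cast_sub hjj2]; ring
      -- seg2 = u[j] :: seg2'
      have hseg2cons : seg2 = u[j] :: (u.drop (j+1)).take (j2 - (j+1)) := by
        rw [hseg2def, List.drop_eq_getElem_cons hjl, show j2 - j = (j2 - (j+1)) + 1 from by omega,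
          List.take_succ_cons]
      have huj : u[j] = u.getD j 0 := (List.getD_eq_getElem u 0 hjl).symm
      have hujne : u[j] ≠ -1 := by rw [huj]; exact hj2ne
      rw [hsplit2, PySem.List.enumerate_append, List.foldl_append, hcastj2]
      rw [hseg2cons, PySem.List.enumerate_cons, List.foldl_cons]
      have hstep1 : pvStepA (d, p, false, (i : Int)) ((j : Int), u[j])
          = (d.insert ((j : Int) - (i : Int)) (pvHeappush (d.getD ((j : Int) - (i : Int)) []) (i : Int)),
             pvPStep p ((j : Int), u[j]), true, (i : Int)) := by
        simp [pvStepA, hujne, pvPStep]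
      rw [hstep1]
      have hpush : pvHeappush (d.getD ((j : Int) - (i : Int)) []) (i : Int)
          = d.getD ((j : Int) - (i : Int)) [] ++ [(i : Int)] := by
        exact pvHeappush_append _ _ (fun y hy => le_of_lt (pvInv_getD hinv _ y hy))
      rw [hpush]
      set d' := d.insert ((j : Int) - (i : Int)) (d.getD ((j : Int) - (i : Int)) [] ++ [(i : Int)]) with hd'
      have hseg2'ne : ∀ x ∈ (u.drop (j+1)).take (j2 - (j+1)), x ≠ -1 := by
        intro x hx
        obtain ⟨k, hk1, hk2, hk3⟩ := pvMemSeg u (j+1) j2 hj2len x hx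
        have := hall2 k (by omega) hk2
        rw [hfree2f] at this; simp at this; rw [hk3]; exact this
      have hc4 : ((j : Int) + 1) = (((j+1) : Nat) : Int) := by push_cast; ring
      rw [hc4, pvFoldA_file _ hseg2'ne (((j+1) : Nat) : Int) (i : Int) d' (pvPStep p ((j : Int), u[j]))]
      have hIH := ihf f2 (by omega) j2 d'
        (pvAppendPos (pvPStep p ((j : Int), u[j])) ((u.drop (j+1)).take (j2 - (j+1))) (((j+1) : Nat) : Int))
        (i : Int) (by omega) hj2len (pvInv_insert hinv (by omega))
      rw [hIH]
      -- now the RHS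
      show _ = pvProcRuns u ((true, i, j) :: pvRunsLoop u j (f2+1)) (d, p)
      rw [hrl2]
      rw [show pvProcRuns u ((true, i, j) :: (free2, j, j2) :: pvRunsLoop u j2 f2) (d, p)
          = pvProcRuns u ((free2, j, j2) :: pvRunsLoop u j2 f2)
              (d.insert ((j : Int) - (i : Int)) (d.getD ((j : Int) - (i : Int)) [] ++ [(i : Int)]), p) from by
        simp [pvProcRuns]]
      rw [hfree2f]
      rw [show pvProcRuns u ((false, j, j2) :: pvRunsLoop u j2 f2) (d', p)
          = pvProcRuns u (pvRunsLoop u j2 f2) (d', pvInner u j j2 p) from by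
        simp [pvProcRuns]]
      have hinner : pvInner u j j2 p
          = pvAppendPos (pvPStep p ((j : Int), u[j])) ((u.drop (j+1)).take (j2 - (j+1))) (((j+1) : Nat) : Int) := by
        rw [pvInner_eq u j j2 p (by omega) hj2len, ← hseg2def, hseg2cons, pvAppendPos,
          PySem.List.enumerate_cons, List.foldl_cons, hc4]
        rfl
      rw [hinner]

-- ===== VERDICT (by name: the statement is the Claim_ definition above) =====
theorem get_distances_and_positions_spec : Claim_equal_get_distances_and_positions := by
  intro u _
  unfold Spec_get_distances_and_positions get_distances_and_positions get_distances_and_positions_alt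
  have hinv : pvInv (PySem.Dict.empty : PySem.Dict Int (List Int)) 0 := by
    refine ⟨PySem.Dict.nodup_keys_empty, ?_⟩
    intro kv hkv
    have hit : (PySem.Dict.empty : PySem.Dict Int (List Int)).items = [] := rfl
    rw [hit] at hkv
    exact absurd hkv (by simp)
  have hmain := pvMain u u.length 0 PySem.Dict.empty PySem.Dict.empty 0 (by omega) (by omega) hinv
  have hB := pvFoldB_eq_procRuns u (pvRunsLoop u 0 u.length) 0 (PySem.Dict.empty, PySem.Dict.empty)
  simp only [List.drop_zero, Nat.cast_zero, Nat.zero_add] at hmain hB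
  simp only [PySem.List.len_eq, hB, ← hmain]
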